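-- pv_equiv track=rewrite | github.com/sergeylobachev/leetcode | Contests/Weekly Contest 400/3.py | solution
-- ===== SOURCE A (Python) =====
-- from collections import defaultdict
--
-- def solution(s):
--
--     d = defaultdict(list)
--     answer = [None] * len(s)
--
--     for idx, letter in enumerate(s):
--         if letter != "*":
--             answer[idx] = letter
--             d[ord(letter) - ord("a")].append(idx)
--         else:
--             answer[idx] = "*"
--             for i in range(26):
--                 if len(d[i]) > 0:
--                     remIdx = d[i].pop()
--                     answer[remIdx] = "*"
--                     break
--
--     ret = []
--     for a in answer:
--         if a != "*":
--             ret.append(a)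
--
--     return "" if len(ret) == 0 else "".join(ret)
-- ===== SOURCE B (Python) =====
-- def _ins(b, avail):
--     # insert bucket b into the ascending list of available buckets
--     if not avail or b < avail[0]:
--         return [b] + avail
--     return [avail[0]] + _ins(b, avail[1:])
--
-- def solution(s):
--     # incremental priority structure: per-letter stacks plus a sorted list of
--     # currently non-empty letter buckets, so a '*' pops the minimum in O(1)
--     stacks = [[] for _ in range(26)]
--     avail = []          # ascending list of buckets with a non-empty stack
--     removed = [False] * len(s)
--     for idx, ch in enumerate(s):
--         if ch == '*':
--             if avail:
--                 b = avail[0]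
--                 removed[stacks[b].pop()] = True
--                 if not stacks[b]:
--                     avail = avail[1:]
--         else:
--             o = ord(ch) - 97
--             if 0 <= o < 26:
--                 if not stacks[o]:
--                     avail = _ins(o, avail)
--                 stacks[o].append(idx)
--     return ''.join(ch for idx, ch in enumerate(s)
--                    if ch != '*' and not removed[idx])
-- ===== Notes on version B (the rewrite author's own statement) =====
-- stated objective: alternative
-- what changed: Replaces A's answer-array overwriting plus a fresh 26-bucket scan per star with an incrementally maintained sorted list of non-empty letter buckets (a simple priority structure) whose head is popped in O(1), plus a removed-flags array and one final filtered pass over the string.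
import Mathlib
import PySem

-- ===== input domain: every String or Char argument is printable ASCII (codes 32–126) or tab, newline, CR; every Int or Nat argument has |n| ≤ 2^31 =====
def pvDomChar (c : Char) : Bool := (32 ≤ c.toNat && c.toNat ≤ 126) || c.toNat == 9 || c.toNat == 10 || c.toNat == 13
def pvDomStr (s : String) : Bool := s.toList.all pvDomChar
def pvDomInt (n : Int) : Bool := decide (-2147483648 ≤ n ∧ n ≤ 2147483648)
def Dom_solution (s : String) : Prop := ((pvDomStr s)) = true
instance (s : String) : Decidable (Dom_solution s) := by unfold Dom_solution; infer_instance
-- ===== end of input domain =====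

-- B maintains per-letter stks plus a sorted list of currently non-empty buckets instead of
-- A's answer-array overwriting with a 26-bucket scan per '*' (objective: alternative algorithm).

-- ===== PORT A =====
-- inner loop "for i in range(26): if len(d[i])>0: remIdx = d[i].pop(); answer[remIdx] = '*'; break"
-- (list.pop() removes and returns the LAST element; guarded by len > 0, so getLast?.getD is exact)
def solInner (d : PySem.Dict Int (List Nat)) (answer : List (Option Char)) (i : Nat) :
    PySem.Dict Int (List Nat) × List (Option Char) :=
  if i < 26 then
    let lst := d.getD (i : Int) []
    if lst.length > 0 then
      (d.insert (i : Int) lst.dropLast, answer.set (lst.getLast?.getD 0) (some '*'))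
    else solInner d answer (i + 1)
  else (d, answer)
termination_by 26 - i

-- body of "for idx, letter in enumerate(s)"; enumerate indices are ≥ 0, so .toNat is exact
def solStep (st : PySem.Dict Int (List Nat) × List (Option Char)) (p : Int × Char) :
    PySem.Dict Int (List Nat) × List (Option Char) :=
  let idx := p.1.toNat
  if p.2 ≠ '*' then
    (st.1.insert ((p.2.toNat : Int) - 97) ((st.1.getD ((p.2.toNat : Int) - 97) []) ++ [idx]),
     st.2.set idx (some p.2))
  else
    solInner st.1 (st.2.set idx (some '*')) 0

def solution (s : String) : String :=
  let cs := s.toList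
  let st := (PySem.List.enumerate cs 0).foldl solStep
      (PySem.Dict.empty, List.replicate cs.length (none : Option Char))
  let ret := st.2.foldl (fun r a => if a ≠ some '*' then r ++ [a] else r) ([] : List (Option Char))
  -- every position of answer was assigned in the loop, so None never reaches the join
  if ret.length = 0 then "" else String.ofList (ret.filterMap id)

-- ===== PORT B =====
-- insert bucket b into the ascending list of available buckets (helper _ins of Source B)
def insAvail (b : Nat) : List Nat → List Nat
  | [] => [b]
  | a :: rest => if b < a then b :: a :: rest else a :: insAvail b rest

-- body of B's "for idx, ch in enumerate(s)"; state = (stks, avail, removed)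
def altStep (st : List (List Nat) × List Nat × List Bool) (p : Int × Char) :
    List (List Nat) × List Nat × List Bool :=
  let idx := p.1.toNat
  if p.2 = '*' then
    match st.2.1 with
    | [] => st
    | b :: rest =>
      let stk := st.1.getD b []
      let removed := st.2.2.set (stk.getLast?.getD 0) true
      let stk' := stk.dropLast
      (st.1.set b stk', if stk' = [] then rest else b :: rest, removed)
  else
    let o : Int := (p.2.toNat : Int) - 97
    if 0 ≤ o ∧ o < 26 then
      let bn := p.2.toNat - 97
      let stk := st.1.getD bn []
      (st.1.set bn (stk ++ [idx]), (if stk = [] then insAvail bn st.2.1 else st.2.1), st.2.2)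
    else st

def solution_alt (s : String) : String :=
  let cs := s.toList
  let st := (PySem.List.enumerate cs 0).foldl altStep
      (List.replicate 26 ([] : List Nat), ([] : List Nat), List.replicate cs.length false)
  String.ofList (((PySem.List.enumerate cs 0).filter
      (fun p => p.2 != '*' && !(st.2.2.getD p.1.toNat false))).map (·.2))

-- ===== PRECONDITION & SPEC =====
def Spec_solution (s : String) (out : String) : Prop := out = solution_alt s
instance (s : String) (out : String) : Decidable (Spec_solution s out) := by unfold Spec_solution; infer_instance

-- ===== CLAIM (what is proved, stated in full; the proofs are below) =====
def Claim_equal_solution : Prop := ∀ (s : String), Dom_solution s → Spec_solution s (solution s)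

-- ===== LEMMAS AND PROOFS =====

theorem List_getD_set {α : Type} (l : List α) (n m : Nat) (v d : α) :
    (l.set n v).getD m d = if m = n ∧ n < l.length then v else l.getD m d := by
  simp only [List.getD_eq_getElem?_getD, List.getElem?_set]
  split_ifs with h1 h2 h3 <;> simp_all

theorem getLastD_mem {α : Type} (l : List α) (d : α) (h : l ≠ []) : l.getLast?.getD d ∈ l := by
  rw [List.getLast?_eq_some_getLast h]
  exact List.getLast_mem h

theorem dropLast_append_getLastD {α : Type} (l : List α) (d : α) (h : l ≠ []) :
    l.dropLast ++ [l.getLast?.getD d] = l := by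
  rw [List.getLast?_eq_some_getLast h]
  exact List.dropLast_concat_getLast h

theorem not_mem_dropLast_of_nodup {α : Type} (l : List α) (d : α) (h : l ≠ []) (hn : l.Nodup) :
    l.getLast?.getD d ∉ l.dropLast := by
  have hd := dropLast_append_getLastD l d h
  rw [← hd] at hn
  have hdis := List.disjoint_of_nodup_append hn
  intro hm
  exact hdis hm (List.mem_singleton_self _)

def InvD (d : PySem.Dict Int (List Nat)) (stks : List (List Nat)) : Prop :=
  stks.length = 26 ∧ ∀ i : Nat, i < 26 → d.getD (i : Int) [] = stks.getD i []

def InvA (stks : List (List Nat)) (avail : List Nat) : Prop :=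
  avail.Pairwise (· < ·) ∧ ∀ b : Nat, b ∈ avail ↔ (b < 26 ∧ stks.getD b [] ≠ [])

def InvS (cs : List Char) (k : Nat) (stks : List (List Nat)) (removed : List Bool) : Prop :=
  (∀ b, b < 26 → ∀ j ∈ stks.getD b [], j < k ∧ removed.getD j false = false ∧ cs.getD j '*' ≠ '*') ∧
  (∀ b, b < 26 → (stks.getD b []).Nodup) ∧
  (∀ b, b < 26 → ∀ b', b' < 26 → ∀ j, j ∈ stks.getD b [] → j ∈ stks.getD b' [] → b = b')

def InvAns (cs : List Char) (k : Nat) (answer : List (Option Char)) (removed : List Bool) : Prop :=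
  answer.length = cs.length ∧ removed.length = cs.length ∧
  (∀ j, j < cs.length → j < k →
    answer.getD j none = some (if cs.getD j '*' = '*' ∨ removed.getD j false = true then '*' else cs.getD j '*')) ∧
  (∀ j, k ≤ j → answer.getD j none = none ∧ removed.getD j false = false)

theorem insAvail_mem (b x : Nat) (l : List Nat) : x ∈ insAvail b l ↔ x = b ∨ x ∈ l := by
  induction l with
  | nil => simp [insAvail]
  | cons a rest ih =>
    simp only [insAvail]
    split <;> simp [ih] <;> tauto

theorem insAvail_pairwise (b : Nat) (l : List Nat) (hs : l.Pairwise (· < ·)) (hb : b ∉ l) :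
    (insAvail b l).Pairwise (· < ·) := by
  induction l with
  | nil => simp [insAvail]
  | cons a rest ih =>
    rcases List.pairwise_cons.1 hs with ⟨ha, hrest⟩
    simp only [insAvail]
    split
    · exact List.pairwise_cons.2 ⟨by intro x hx; rcases List.mem_cons.1 hx with h | h; omega; exact lt_trans (by assumption) (ha x h), hs⟩
    · have hba : a < b := by
        have : b ≠ a := by intro h; exact hb (h ▸ List.mem_cons_self)
        omega
      refine List.pairwise_cons.2 ⟨?_, ih hrest (fun h => hb (List.mem_cons_of_mem _ h))⟩
      intro x hx
      rcases (insAvail_mem b x rest).1 hx with h | h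
      · omega
      · exact ha x h

theorem solInner_none (d : PySem.Dict Int (List Nat)) (answer : List (Option Char)) (i0 : Nat)
    (h : ∀ i : Nat, i0 ≤ i → i < 26 → d.getD (i : Int) [] = []) :
    solInner d answer i0 = (d, answer) := by
  by_cases hlt : i0 < 26
  · rw [solInner]
    simp only [hlt, if_true]
    rw [h i0 le_rfl hlt]
    simp only [List.length_nil, gt_iff_lt, Nat.lt_irrefl, if_false]
    exact solInner_none d answer (i0 + 1) (fun i hi hi' => h i (by omega) hi')
  · rw [solInner]; simp [hlt]
termination_by 26 - i0

theorem solInner_find (d : PySem.Dict Int (List Nat)) (answer : List (Option Char)) (i0 b : Nat)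
    (hi0 : i0 ≤ b) (hb : b < 26) (hne : d.getD (b : Int) [] ≠ [])
    (h : ∀ i : Nat, i0 ≤ i → i < b → d.getD (i : Int) [] = []) :
    solInner d answer i0 =
      (d.insert (b : Int) (d.getD (b : Int) []).dropLast,
       answer.set ((d.getD (b : Int) []).getLast?.getD 0) (some '*')) := by
  rcases Nat.eq_or_lt_of_le hi0 with heq | hlt
  · subst heq
    rw [solInner]
    have : (d.getD (i0 : Int) []).length > 0 := List.length_pos_iff.2 hne
    simp [hb, this]
  · rw [solInner]
    have h0 : d.getD (i0 : Int) [] = [] := h i0 le_rfl hlt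
    simp only [show i0 < 26 by omega, if_true, h0, List.length_nil, gt_iff_lt, Nat.lt_irrefl, if_false]
    exact solInner_find d answer (i0 + 1) b (by omega) hb hne (fun i hi hi' => h i (by omega) hi')
termination_by b - i0

theorem invAns_set (cs : List Char) (k : Nat) (answer : List (Option Char)) (removed : List Bool)
    (hk : k < cs.length) (h : InvAns cs k answer removed) :
    InvAns cs (k + 1) (answer.set k (some (if cs.getD k '*' = '*' then '*' else cs.getD k '*'))) removed := by
  obtain ⟨hAlen, hRlen, hlo, hhi⟩ := h
  refine ⟨by simp [hAlen], hRlen, ?_, ?_⟩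
  · intro j hj hj1
    rw [List_getD_set]
    by_cases hjk : j = k
    · subst hjk
      have hrk : removed.getD j false = false := (hhi j le_rfl).2
      simp only [List.getD_eq_getElem?_getD] at hrk
      simp [hAlen, hj, hrk]
    · have hjk' : j < k := by omega
      simp only [hjk, false_and, if_false]
      exact hlo j hj hjk'
  · intro j hj
    have hjk : j ≠ k := by omega
    rw [List_getD_set]
    simp only [hjk, false_and, if_false]
    exact hhi j (by omega)

theorem invAns_mark (cs : List Char) (m : Nat) (answer : List (Option Char)) (removed : List Bool)
    (r : Nat) (hrlen : r < cs.length) (hrm : r < m) (h : InvAns cs m answer removed) :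
    InvAns cs m (answer.set r (some '*')) (removed.set r true) := by
  obtain ⟨hAlen, hRlen, hlo, hhi⟩ := h
  refine ⟨by simp [hAlen], by simp [hRlen], ?_, ?_⟩
  · intro j hj hjm
    rw [List_getD_set, List_getD_set]
    by_cases hjr : j = r
    · subst hjr; simp [hAlen, hRlen, hrlen]
    · simp only [hjr, false_and, if_false]
      exact hlo j hj hjm
  · intro j hjm
    have hjr : j ≠ r := by omega
    rw [List_getD_set, List_getD_set]
    simp only [hjr, false_and, if_false]
    exact hhi j hjm

theorem step_pres (cs : List Char) (k : Nat) (c : Char) (hk : k < cs.length)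
    (hc : cs.getD k '*' = c)
    (d : PySem.Dict Int (List Nat)) (answer : List (Option Char))
    (stks : List (List Nat)) (avail : List Nat) (removed : List Bool)
    (hD : InvD d stks) (hA : InvA stks avail) (hS : InvS cs k stks removed)
    (hAns : InvAns cs k answer removed) :
    InvD (solStep (d, answer) ((k : Int), c)).1 (altStep (stks, avail, removed) ((k : Int), c)).1 ∧
    InvA (altStep (stks, avail, removed) ((k : Int), c)).1 (altStep (stks, avail, removed) ((k : Int), c)).2.1 ∧
    InvS cs (k + 1) (altStep (stks, avail, removed) ((k : Int), c)).1 (altStep (stks, avail, removed) ((k : Int), c)).2.2 ∧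
    InvAns cs (k + 1) (solStep (d, answer) ((k : Int), c)).2 (altStep (stks, avail, removed) ((k : Int), c)).2.2 := by
  obtain ⟨hDlen, hDeq⟩ := hD
  obtain ⟨hApw, hAmem⟩ := hA
  obtain ⟨hS1, hS2, hS3⟩ := hS
  have hAns' := hAns
  obtain ⟨hAlen, hRlen, hAlo, hAhi⟩ := hAns'
  by_cases hstar : c = '*'
  · subst hstar
    have hAeq0 : solStep (d, answer) ((k : Int), '*') = solInner d (answer.set k (some '*')) 0 := by
      simp [solStep]
    cases havail : avail with
    | nil =>
      have hempty : ∀ i : Nat, i < 26 → d.getD (i : Int) [] = [] := by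
        intro i hi
        rw [hDeq i hi]
        by_contra hne
        have hmem : i ∈ avail := (hAmem i).2 ⟨hi, hne⟩
        rw [havail] at hmem
        exact absurd hmem List.not_mem_nil
      have hBeq : altStep (stks, ([] : List Nat), removed) ((k : Int), '*') = (stks, [], removed) := by
        simp [altStep]
      have hAeq : solStep (d, answer) ((k : Int), '*') = (d, answer.set k (some '*')) := by
        rw [hAeq0, solInner_none d _ 0 (fun i _ hi => hempty i hi)]
      rw [hAeq, hBeq]
      refine ⟨⟨hDlen, hDeq⟩, ⟨List.Pairwise.nil, fun x => havail ▸ hAmem x⟩, ?_, ?_⟩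
      · exact ⟨fun b hb j hj => ⟨by have := (hS1 b hb j hj).1; omega, (hS1 b hb j hj).2⟩, hS2, hS3⟩
      · have h1 := invAns_set cs k answer removed hk hAns
        rw [hc] at h1
        simpa using h1
    | cons b rest =>
      have hbfacts : b < 26 ∧ stks.getD b [] ≠ [] := (hAmem b).1 (by rw [havail]; exact List.mem_cons_self)
      have hbrest : ∀ x ∈ rest, b < x := fun x hx => (List.pairwise_cons.1 (havail ▸ hApw)).1 x hx
      have hbnotrest : b ∉ rest := fun hx => absurd (hbrest b hx) (lt_irrefl b)
      have hemptylt : ∀ i : Nat, 0 ≤ i → i < b → d.getD (i : Int) [] = [] := by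
        intro i _ hib
        have hi26 : i < 26 := by omega
        rw [hDeq i hi26]
        by_contra hne
        have : i ∈ avail := (hAmem i).2 ⟨hi26, hne⟩
        rw [havail] at this
        rcases List.mem_cons.1 this with h | h
        · omega
        · exact absurd (hbrest i h) (by omega)
      have hdstk : d.getD (b : Int) [] = stks.getD b [] := hDeq b hbfacts.1
      have hrmem : (stks.getD b []).getLast?.getD 0 ∈ stks.getD b [] := getLastD_mem _ 0 hbfacts.2
      have hrfacts := hS1 b hbfacts.1 _ hrmem
      have hnodupb := hS2 b hbfacts.1
      have hrnotdrop : (stks.getD b []).getLast?.getD 0 ∉ (stks.getD b []).dropLast :=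
        not_mem_dropLast_of_nodup _ 0 hbfacts.2 hnodupb
      have hAeq : solStep (d, answer) ((k : Int), '*') =
          (d.insert (b : Int) (stks.getD b []).dropLast,
           (answer.set k (some '*')).set ((stks.getD b []).getLast?.getD 0) (some '*')) := by
        rw [hAeq0, solInner_find d _ 0 b (Nat.zero_le b) hbfacts.1 (by rw [hdstk]; exact hbfacts.2) hemptylt, hdstk]
      have hBeq : altStep (stks, b :: rest, removed) ((k : Int), '*') =
          (stks.set b (stks.getD b []).dropLast,
           (if (stks.getD b []).dropLast = [] then rest else b :: rest),
           removed.set ((stks.getD b []).getLast?.getD 0) true) := by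
        simp [altStep]
      rw [hAeq, hBeq]
      have hstklen : stks.length = 26 := hDlen
      refine ⟨⟨by simp [hstklen], ?_⟩, ⟨?_, ?_⟩, ⟨?_, ?_, ?_⟩, ?_⟩
      · -- InvD.2
        intro i hi
        rw [PySem.Dict.getD_insert, List_getD_set]
        by_cases hib : i = b
        · subst hib; simp [hstklen, hi]
        · have : (i : Int) ≠ (b : Int) := by exact_mod_cast hib
          simp [this, hib, hDeq i hi]
      · -- InvA pairwise
        split
        · exact (List.pairwise_cons.1 (havail ▸ hApw)).2
        · exact havail ▸ hApw
      · -- InvA membership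
        intro x
        rw [List_getD_set]
        by_cases hxb : x = b
        · subst hxb
          split
          · next hdrop =>
            simp only [hdrop]
            constructor
            · intro hx; exact absurd hx hbnotrest
            · rintro ⟨-, hne⟩; simp [hstklen, hbfacts.1] at hne
          · next hdrop =>
            rw [if_pos ⟨rfl, by omega⟩]
            constructor
            · intro _; exact ⟨hbfacts.1, hdrop⟩
            · intro _; exact List.mem_cons_self
        · have hx' : x ∈ (if (stks.getD b []).dropLast = [] then rest else b :: rest) ↔ x ∈ b :: rest := by
            split <;> simp [List.mem_cons, hxb]
          simp only [hxb, false_and, if_false]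
          rw [hx']
          exact havail ▸ hAmem x
      · -- InvS entries
        intro b1 hb1 j hj
        rw [List_getD_set] at hj
        rw [List_getD_set]
        by_cases hb1b : b1 = b
        · subst hb1b
          rw [if_pos ⟨rfl, by omega⟩] at hj
          have hjstk : j ∈ stks.getD b1 [] := List.mem_of_mem_dropLast hj
          have hf := hS1 b1 hbfacts.1 j hjstk
          have hjr : j ≠ (stks.getD b1 []).getLast?.getD 0 := fun h => hrnotdrop (h ▸ hj)
          rw [if_neg (fun hcp => hjr hcp.1)]
          exact ⟨by omega, hf.2.1, hf.2.2⟩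
        · rw [if_neg (by simp [hb1b])] at hj
          have hf := hS1 b1 hb1 j hj
          have hjr : j ≠ (stks.getD b []).getLast?.getD 0 := by
            intro h
            exact hb1b (hS3 b1 hb1 b hbfacts.1 j hj (h ▸ hrmem))
          rw [if_neg (fun hcp => hjr hcp.1)]
          exact ⟨by omega, hf.2.1, hf.2.2⟩
      · -- InvS nodup
        intro b1 hb1
        rw [List_getD_set]
        split
        · exact List.Nodup.sublist (List.dropLast_sublist _) hnodupb
        · exact hS2 b1 hb1
      · -- InvS cross
        intro b1 hb1 b2 hb2 j hj1 hj2
        have conv : ∀ b0, j ∈ (stks.set b (stks.getD b []).dropLast).getD b0 [] → j ∈ stks.getD b0 [] := by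
          intro b0 hjm
          rw [List_getD_set] at hjm
          split at hjm
          · next hcond => exact hcond.1 ▸ List.mem_of_mem_dropLast hjm
          · exact hjm
        exact hS3 b1 hb1 b2 hb2 j (conv b1 hj1) (conv b2 hj2)
      · -- InvAns
        have h1 := invAns_set cs k answer removed hk hAns
        rw [hc] at h1
        simp only [ite_self] at h1
        have h2 := invAns_mark cs (k+1) (answer.set k (some '*')) removed ((stks.getD b []).getLast?.getD 0) (by have := hrfacts.1; omega) (by have := hrfacts.1; omega) h1
        exact h2
  · -- letter
    have hAeq : solStep (d, answer) ((k : Int), c) =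
        (d.insert ((c.toNat : Int) - 97) ((d.getD ((c.toNat : Int) - 97) []) ++ [k]),
         answer.set k (some c)) := by
      simp [solStep, hstar]
    have hval : (some (if cs.getD k '*' = '*' then '*' else cs.getD k '*')) = some c := by
      rw [hc]; simp [hstar]
    have hAnsNew : InvAns cs (k + 1) (answer.set k (some c)) removed := by
      have h1 := invAns_set cs k answer removed hk hAns
      rw [hval] at h1
      exact h1
    by_cases hrange : (0 : Int) ≤ (c.toNat : Int) - 97 ∧ (c.toNat : Int) - 97 < 26
    · have h97 : 97 ≤ c.toNat ∧ c.toNat < 123 := by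
        obtain ⟨h1, h2⟩ := hrange
        omega
      have hocast : ((c.toNat : Int) - 97) = ((c.toNat - 97 : Nat) : Int) := by omega
      have hBeq : altStep (stks, avail, removed) ((k : Int), c) =
          (stks.set (c.toNat - 97) ((stks.getD (c.toNat - 97) []) ++ [k]),
           (if stks.getD (c.toNat - 97) [] = [] then insAvail (c.toNat - 97) avail else avail),
           removed) := by
        simp only [altStep]
        rw [if_neg hstar, if_pos hrange]
        simp
      rw [hAeq, hBeq]
      set bn := c.toNat - 97 with hbndef
      have hbn26 : bn < 26 := by omega
      refine ⟨⟨by simp [hDlen], ?_⟩, ⟨?_, ?_⟩, ⟨?_, ?_, ?_⟩, hAnsNew⟩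
      · -- InvD
        intro i hi
        rw [PySem.Dict.getD_insert, List_getD_set, hocast]
        by_cases hib : i = bn
        · subst hib
          rw [if_pos rfl, if_pos ⟨rfl, by omega⟩, hDeq bn hi]
        · have hibz : (i : Int) ≠ ((bn : Nat) : Int) := by exact_mod_cast hib
          rw [if_neg hibz, if_neg (by simp [hib])]
          exact hDeq i hi
      · -- InvA pairwise
        split
        · next hstk =>
          apply insAvail_pairwise _ _ hApw
          intro hmem
          exact absurd hstk ((hAmem bn).1 hmem).2
        · exact hApw
      · -- InvA membership
        intro x
        rw [List_getD_set]
        by_cases hstk : stks.getD bn [] = []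
        · rw [if_pos hstk, insAvail_mem]
          by_cases hxbn : x = bn
          · subst hxbn
            simp [hDlen, hbn26]
          · simp only [hxbn, false_or, false_and, if_false]
            exact hAmem x
        · rw [if_neg hstk]
          by_cases hxbn : x = bn
          · subst hxbn
            rw [if_pos ⟨rfl, by omega⟩]
            constructor
            · intro _; exact ⟨hbn26, by simp⟩
            · intro _; exact (hAmem bn).2 ⟨hbn26, hstk⟩
          · rw [if_neg (by simp [hxbn])]
            exact hAmem x
      · -- InvS entries
        intro b1 hb1 j hj
        rw [List_getD_set] at hj
        by_cases hb1bn : b1 = bn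
        · subst hb1bn
          rw [if_pos ⟨rfl, by omega⟩] at hj
          rcases List.mem_append.1 hj with h | h
          · have hf := hS1 bn hbn26 j h
            exact ⟨by omega, hf.2.1, hf.2.2⟩
          · have hjk : j = k := List.mem_singleton.1 h
            subst hjk
            exact ⟨by omega, (hAhi j le_rfl).2, by rw [hc]; exact hstar⟩
        · rw [if_neg (by simp [hb1bn])] at hj
          have hf := hS1 b1 hb1 j hj
          exact ⟨by omega, hf.2.1, hf.2.2⟩
      · -- InvS nodup
        intro b1 hb1
        rw [List_getD_set]
        split
        · next hcond =>
          rw [hcond.1] at *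
          apply List.Nodup.append (hS2 bn hbn26) (List.nodup_singleton k)
          intro a ha hb
          have hak : a = k := List.mem_singleton.1 hb
          subst hak
          exact absurd (hS1 bn hbn26 a ha).1 (lt_irrefl a)
        · exact hS2 b1 hb1
      · -- InvS cross
        intro b1 hb1 b2 hb2 j hj1 hj2
        by_cases hb1bn : b1 = bn <;> by_cases hb2bn : b2 = bn
        · rw [hb1bn, hb2bn]
        · subst hb1bn
          rw [List_getD_set, if_pos ⟨rfl, by omega⟩] at hj1
          rw [List_getD_set, if_neg (by simp [hb2bn])] at hj2
          rcases List.mem_append.1 hj1 with h | h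
          · exact hS3 bn hbn26 b2 hb2 j h hj2
          · have hjk : j = k := List.mem_singleton.1 h
            subst hjk
            exact absurd (hS1 b2 hb2 j hj2).1 (lt_irrefl j)
        · subst hb2bn
          rw [List_getD_set, if_neg (by simp [hb1bn])] at hj1
          rw [List_getD_set, if_pos ⟨rfl, by omega⟩] at hj2
          rcases List.mem_append.1 hj2 with h | h
          · exact absurd (hS3 b1 hb1 bn hbn26 j hj1 h) hb1bn
          · have hjk : j = k := List.mem_singleton.1 h
            subst hjk
            exact absurd (hS1 b1 hb1 j hj1).1 (lt_irrefl j)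
        · rw [List_getD_set, if_neg (by simp [hb1bn])] at hj1
          rw [List_getD_set, if_neg (by simp [hb2bn])] at hj2
          exact hS3 b1 hb1 b2 hb2 j hj1 hj2
    · -- out of range: A stores the index under a key outside 0..25, B ignores it
      have hBeq : altStep (stks, avail, removed) ((k : Int), c) = (stks, avail, removed) := by
        simp only [altStep]
        rw [if_neg hstar, if_neg hrange]
      rw [hAeq, hBeq]
      refine ⟨⟨hDlen, ?_⟩, ⟨hApw, hAmem⟩,
        ⟨fun b hb j hj => ⟨by have := (hS1 b hb j hj).1; omega, (hS1 b hb j hj).2⟩, hS2, hS3⟩, hAnsNew⟩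
      intro i hi
      rw [PySem.Dict.getD_insert]
      have hne : (i : Int) ≠ (c.toNat : Int) - 97 := by
        rcases not_and_or.1 hrange with h | h <;> omega
      rw [if_neg hne]
      exact hDeq i hi

theorem sim (cs : List Char) (suf : List Char) :
    ∀ (k : Nat), cs.drop k = suf → k + suf.length = cs.length →
    ∀ (d : PySem.Dict Int (List Nat)) (answer : List (Option Char))
      (stks : List (List Nat)) (avail : List Nat) (removed : List Bool),
    InvD d stks → InvA stks avail → InvS cs k stks removed → InvAns cs k answer removed →
    InvAns cs cs.length
      (((PySem.List.enumerate suf (k : Int)).foldl solStep (d, answer)).2)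
      (((PySem.List.enumerate suf (k : Int)).foldl altStep (stks, avail, removed)).2.2) := by
  induction suf with
  | nil =>
    intro k _ hlen d answer stks avail removed _ _ _ hAns
    have hkeq : k = cs.length := by simpa using hlen
    simpa [PySem.List.enumerate_nil, hkeq] using hkeq ▸ hAns
  | cons c rest ih =>
    intro k hdrop hlen d answer stks avail removed hD hA hS hAns
    have hk : k < cs.length := by simp at hlen; omega
    have hck : cs.getD k '*' = c := by
      have h0 : (cs.drop k)[0]? = some c := by rw [hdrop]; rfl
      rw [List.getElem?_drop] at h0
      simp only [Nat.add_zero] at h0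
      simp [List.getD_eq_getElem?_getD, h0]
    have hdrop' : cs.drop (k + 1) = rest := by
      have : cs.drop (k + 1) = (cs.drop k).drop 1 := by rw [List.drop_drop]
      rw [this, hdrop]
      rfl
    rw [PySem.List.enumerate_cons]
    simp only [List.foldl_cons]
    obtain ⟨p1, p2, p3, p4⟩ := step_pres cs k c hk hck d answer stks avail removed hD hA hS hAns
    have hres := ih (k + 1) hdrop' (by simp at hlen ⊢; omega)
      (solStep (d, answer) ((k : Int), c)).1 (solStep (d, answer) ((k : Int), c)).2
      (altStep (stks, avail, removed) ((k : Int), c)).1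
      (altStep (stks, avail, removed) ((k : Int), c)).2.1
      (altStep (stks, avail, removed) ((k : Int), c)).2.2
      p1 p2 p3 p4
    have hcast : ((k : Int) + 1) = (((k + 1 : Nat)) : Int) := by push_cast; ring
    rw [hcast]
    simpa using hres

theorem filter_map_congr {α β : Type} (l : List α) (P Q : α → Bool) (f g : α → β)
    (hPQ : ∀ j ∈ l, P j = Q j) (hfg : ∀ j ∈ l, Q j = true → f j = g j) :
    (l.filter P).map f = (l.filter Q).map g := by
  rw [List.filter_congr hPQ]
  exact List.map_congr_left fun a ha => hfg a (List.mem_filter.1 ha).1 (by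
    have := (List.mem_filter.1 ha).2; simpa using this)

theorem final_out (cs : List Char) (answer : List (Option Char)) (removed : List Bool)
    (hAns : InvAns cs cs.length answer removed) :
    (if (answer.foldl (fun r a => if a ≠ some '*' then r ++ [a] else r) ([] : List (Option Char))).length = 0
      then "" else String.ofList ((answer.foldl (fun r a => if a ≠ some '*' then r ++ [a] else r) ([] : List (Option Char))).filterMap id))
    = String.ofList (((PySem.List.enumerate cs 0).filter
        (fun p => p.2 != '*' && !(removed.getD p.1.toNat false))).map (·.2)) := by
  obtain ⟨hla, hlr, hlo, _⟩ := hAns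
  have hans : answer = (List.range cs.length).map
      (fun j => some (if cs.getD j '*' = '*' ∨ removed.getD j false = true then '*' else cs.getD j '*')) := by
    apply List.ext_getElem (by simpa using hla)
    intro j h1 h2
    have hj : j < cs.length := by simpa using h2
    have := hlo j hj hj
    rw [List.getD_eq_getElem?_getD, List.getElem?_eq_getElem h1] at this
    simp only [Option.getD_some] at this
    simpa [this] using this
  rw [PySem.List.foldl_append_ite_eq_filter, hans, List.nil_append, List.filter_map]
  have keymk : ∀ (l : List Nat) (G : Nat → Char), (l.map (fun j => some (G j))).filterMap id = l.map G := by
    intro l G; simp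
  have keylen : ∀ (l : List Nat) (G : Nat → Char), (l.map (fun j => some (G j))).length = l.length := by
    intro l G; simp
  have key : ((List.range cs.length).filter
        ((fun x => decide (x ≠ some '*')) ∘ (fun j => some (if cs.getD j '*' = '*' ∨ removed.getD j false = true then '*' else cs.getD j '*')))).map
        (fun j => (if cs.getD j '*' = '*' ∨ removed.getD j false = true then '*' else cs.getD j '*'))
      = ((PySem.List.enumerate cs 0).filter
        (fun p => p.2 != '*' && !(removed.getD p.1.toNat false))).map (·.2) := by
    rw [PySem.List.enumerate_eq_map_pyRange (xs := cs) ('*')]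
    rw [show PySem.List.len cs = ((cs.length : Int)) from rfl, PySem.List.pyRange_zero_natCast]
    rw [List.map_map, List.filter_map, List.map_map]
    apply filter_map_congr
    · intro j _
      by_cases h1 : cs[j]?.getD '*' = '*' <;> by_cases h2 : removed[j]?.getD false = true <;>
        simp [Function.comp, List.getD, h1, h2, PySem.List.pyGetD_natCast]
    · intro j _ hQ
      simp only [Function.comp, PySem.List.pyGetD_natCast, Int.toNat_natCast, List.getD_eq_getElem?_getD] at hQ ⊢
      simp only [Bool.and_eq_true, bne_iff_ne, ne_eq, Bool.not_eq_eq_eq_not, Bool.not_true] at hQ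
      simp [hQ.1, hQ.2]
  rw [keymk, keylen, key]
  by_cases hE : (((PySem.List.enumerate cs 0).filter
        (fun p => p.2 != '*' && !(removed.getD p.1.toNat false))).map (·.2)) = []
  · have h0 : (((List.range cs.length).filter
        ((fun x => decide (x ≠ some '*')) ∘ (fun j => some (if cs.getD j '*' = '*' ∨ removed.getD j false = true then '*' else cs.getD j '*'))))).length = 0 := by
      have := congrArg List.length key
      rw [hE] at this
      simpa using this
    rw [hE, if_pos h0]
  · have hne : (((List.range cs.length).filter
        ((fun x => decide (x ≠ some '*')) ∘ (fun j => some (if cs.getD j '*' = '*' ∨ removed.getD j false = true then '*' else cs.getD j '*'))))).length ≠ 0 := by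
      intro h0
      apply hE
      have hfe : ((List.range cs.length).filter
        ((fun x => decide (x ≠ some '*')) ∘ (fun j => some (if cs.getD j '*' = '*' ∨ removed.getD j false = true then '*' else cs.getD j '*')))) = [] :=
        List.length_eq_zero_iff.1 h0
      rw [← key, hfe]
      rfl
    rw [if_neg hne]

-- ===== VERDICT (by name: the statement is the Claim_ definition above) =====
theorem solution_spec : Claim_equal_solution := by
  intro s _
  unfold Spec_solution solution solution_alt
  have hinit1 : InvD PySem.Dict.empty (List.replicate 26 ([] : List Nat)) := by
    refine ⟨by simp, fun i hi => ?_⟩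
    rw [PySem.Dict.getD_empty, List.getD_eq_getElem?_getD, List.getElem?_replicate, if_pos hi]
    rfl
  have hinit2 : InvA (List.replicate 26 ([] : List Nat)) [] := by
    refine ⟨List.Pairwise.nil, fun b => ?_⟩
    rw [List.getD_eq_getElem?_getD, List.getElem?_replicate]
    by_cases hb : b < 26 <;> simp [hb]
  have hinit3 : InvS s.toList 0 (List.replicate 26 ([] : List Nat)) (List.replicate s.toList.length false) := by
    refine ⟨fun b hb j hj => ?_, fun b hb => ?_, fun b hb b' hb' j hj _ => ?_⟩ <;>
      rw [List.getD_eq_getElem?_getD, List.getElem?_replicate, if_pos hb] at * <;> simp_all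
  have hinit4 : InvAns s.toList 0 (List.replicate s.toList.length (none : Option Char))
      (List.replicate s.toList.length false) := by
    refine ⟨by simp, by simp, fun j _ hj0 => absurd hj0 (Nat.not_lt_zero j), fun j _ => ?_⟩
    rw [List.getD_eq_getElem?_getD, List.getElem?_replicate, List.getD_eq_getElem?_getD, List.getElem?_replicate]
    by_cases hj : j < s.length <;> simp [hj]
  have h := sim s.toList s.toList 0 (by simp) (by simp)
    PySem.Dict.empty (List.replicate s.toList.length (none : Option Char))
    (List.replicate 26 ([] : List Nat)) [] (List.replicate s.toList.length false)
    hinit1 hinit2 hinit3 hinit4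
  exact final_out s.toList _ _ h
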